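-- pv_equiv track=rewrite | github.com/jmagar/crawly-mcp | crawler_mcp/core/browser_pool.py | _deduplicate_args
-- ===== SOURCE A (Python) =====
-- def _deduplicate_args(args: list[str]) -> list[str]:
--     """Remove duplicate arguments, keeping the last occurrence."""
--     seen = set()
--     result = []
--     for arg in reversed(args):
--         # Extract the flag name (before '=' if present)
--         flag_name = arg.split("=")[0]
--         if flag_name not in seen:
--             seen.add(flag_name)
--             result.append(arg)
--     return list(reversed(result))
-- ===== SOURCE B (Python) =====
-- def _deduplicate_args(args: list[str]) -> list[str]:
--     """Remove duplicate arguments, keeping the last occurrence."""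
--     d = {}
--     for arg in args:
--         flag_name = arg.split("=")[0]
--         if flag_name in d:
--             del d[flag_name]
--         d[flag_name] = arg
--     return list(d.values())
-- ===== Notes on version B (the rewrite author's own statement) =====
-- stated objective: idiomatic
-- what changed: Replaces the reversed-scan with a membership set plus a final reversal by a single forward pass over an insertion-ordered dict that deletes-then-reinserts each flag, so the last value ends up in last-occurrence position and the result is just the dict's values.
import Mathlib
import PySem

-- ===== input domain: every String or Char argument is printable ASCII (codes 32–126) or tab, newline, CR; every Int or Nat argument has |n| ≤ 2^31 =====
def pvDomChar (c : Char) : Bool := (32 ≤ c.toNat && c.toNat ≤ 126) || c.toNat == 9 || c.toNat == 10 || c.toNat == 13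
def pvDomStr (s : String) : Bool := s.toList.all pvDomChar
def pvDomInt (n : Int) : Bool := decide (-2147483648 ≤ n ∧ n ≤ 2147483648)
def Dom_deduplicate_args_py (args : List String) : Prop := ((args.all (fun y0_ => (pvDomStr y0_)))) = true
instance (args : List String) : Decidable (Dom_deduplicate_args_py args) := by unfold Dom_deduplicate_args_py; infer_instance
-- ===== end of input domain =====

-- B replaces A's reversed scan + seen-set + final reversal by one forward pass over an
-- insertion-ordered dict with delete-then-reinsert (move-to-end); idiomatic, same cost.


-- ===== PORT A =====
-- arg.split("=")[0]: sep ≠ "" so split? is some and the pieces list is nonempty (both getD/headD defaults unreachable); exact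
def pvFlag (arg : String) : String := ((PySem.Str.split? arg "=").getD []).headD ""

-- loop body of A: state = (seen, result)
def pvAStep (st : PySem.Set String × List String) (arg : String) : PySem.Set String × List String :=
  if st.1.contains (pvFlag arg) then st else (st.1.add (pvFlag arg), st.2 ++ [arg])

def deduplicate_args_py (args : List String) : List String :=
  (args.reverse.foldl pvAStep (PySem.Set.empty, [])).2.reverse

-- ===== PORT B =====
-- loop body of B: delete the flag if present, then (re)insert at the end
def pvBStep (d : PySem.Dict String String) (arg : String) : PySem.Dict String String :=
  (if d.contains (pvFlag arg) then d.erase (pvFlag arg) else d).insert (pvFlag arg) arg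

def deduplicate_args_py_alt (args : List String) : List String :=
  (args.foldl pvBStep PySem.Dict.empty).values

-- ===== PRECONDITION & SPEC =====
def Spec_deduplicate_args_py (args : List String) (out : List String) : Prop := out = deduplicate_args_py_alt args
instance (args : List String) (out : List String) : Decidable (Spec_deduplicate_args_py args out) := by unfold Spec_deduplicate_args_py; infer_instance

-- ===== CLAIM (what is proved, stated in full; the proofs are below) =====
def Claim_equal_deduplicate_args_py : Prop := ∀ (args : List String), Dom_deduplicate_args_py args → Spec_deduplicate_args_py args (deduplicate_args_py args)

-- ===== LEMMAS AND PROOFS =====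

-- unfold one fully applied A-step without touching the partially applied one inside foldl
theorem pvAStep_eq (st : PySem.Set String × List String) (arg : String) :
    pvAStep st arg =
      if st.1.contains (pvFlag arg) then st else (st.1.add (pvFlag arg), st.2 ++ [arg]) := rfl

-- A's seen-set after folding a list l holds exactly the starting set plus the flags of l
theorem pvA_fst_mem (l : List String) (st : PySem.Set String × List String) (k : String) :
    k ∈ (l.foldl pvAStep st).1 ↔ k ∈ st.1 ∨ k ∈ l.map pvFlag := by
  induction l generalizing st with
  | nil => simp
  | cons a l ih =>
    simp only [List.foldl_cons, List.map_cons, List.mem_cons, ih]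
    unfold pvAStep
    by_cases h : st.1.contains (pvFlag a) = true
    · rw [if_pos h]
      have hmem : pvFlag a ∈ st.1 := by
        simpa [PySem.Set.contains, List.contains_iff_mem] using h
      constructor
      · tauto
      · rintro (h1 | h1 | h1)
        · tauto
        · subst h1; tauto
        · tauto
    · rw [if_neg h]
      simp only [PySem.Set.mem_add]
      tauto

-- A's recurrence: the head is kept iff its flag does not occur among the tail's flags
theorem pvA_cons (x : String) (xs : List String) :
    deduplicate_args_py (x :: xs) =
      if pvFlag x ∈ xs.map pvFlag then deduplicate_args_py xs
      else x :: deduplicate_args_py xs := by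
  unfold deduplicate_args_py
  rw [List.reverse_cons, List.foldl_append]
  simp only [List.foldl_cons, List.foldl_nil]
  rw [pvAStep_eq]
  by_cases h : pvFlag x ∈ xs.map pvFlag
  · have hc : ((xs.reverse).foldl pvAStep (PySem.Set.empty, [])).1.contains (pvFlag x) = true := by
      simp only [PySem.Set.contains, List.contains_iff_mem]
      exact (pvA_fst_mem _ _ _).mpr (Or.inr (by simpa using h))
    rw [if_pos hc, if_pos h]
  · have hc : ((xs.reverse).foldl pvAStep (PySem.Set.empty, [])).1.contains (pvFlag x) = false := by
      rw [Bool.eq_false_iff]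
      intro hct
      have hmem : pvFlag x ∈ ((xs.reverse).foldl pvAStep (PySem.Set.empty, [])).1 := by
        simpa [PySem.Set.contains, List.contains_iff_mem] using hct
      rcases (pvA_fst_mem _ _ _).mp hmem with h1 | h1
      · simp [PySem.Set.empty] at h1
      · exact h (by simpa using h1)
    rw [if_neg (by rw [hc]; simp), if_neg h]
    simp

-- one B step on the items list: drop the flag's old entry, append the new one
theorem pvB_step_items (d : PySem.Dict String String) (a : String) :
    (pvBStep d a).items =
      d.items.filter (fun p => decide (p.1 ≠ pvFlag a)) ++ [(pvFlag a, a)] := by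
  unfold pvBStep
  by_cases h : d.contains (pvFlag a) = true
  · have h2 : (d.erase (pvFlag a)).contains (pvFlag a) = false := by
      simp [PySem.Dict.erase, PySem.Dict.contains, List.any_filter]
    rw [if_pos h, PySem.Dict.items_insert_of_not_contains _ _ h2]
    simp only [PySem.Dict.erase]
    congr 1
    apply List.filter_congr
    intro p _
    by_cases hpq : p.1 = pvFlag a <;> simp [hpq]
  · have h2 : d.items.filter (fun p => decide (p.1 ≠ pvFlag a)) = d.items := by
      apply List.filter_eq_self.mpr
      intro p hp
      simp only [decide_eq_true_eq, ne_eq]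
      intro hpk
      apply h
      simp only [PySem.Dict.contains, List.any_eq_true]
      exact ⟨p, hp, by simp [hpk]⟩
    rw [if_neg h, PySem.Dict.items_insert_of_not_contains _ _ (by simpa using h), h2]

-- B's fold from an arbitrary dict: entries whose flag recurs in l are dropped, the rest
-- of the result is independent of the start dict
theorem pvB_fold_items (l : List String) (d : PySem.Dict String String) :
    (l.foldl pvBStep d).items =
      d.items.filter (fun p => decide (p.1 ∉ l.map pvFlag)) ++
        (l.foldl pvBStep PySem.Dict.empty).items := by
  induction l generalizing d with
  | nil => simp [PySem.Dict.empty]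
  | cons a l ih =>
    simp only [List.foldl_cons]
    rw [ih (pvBStep d a), ih (pvBStep PySem.Dict.empty a), pvB_step_items, pvB_step_items]
    have hemp : (PySem.Dict.empty : PySem.Dict String String).items = [] := rfl
    simp only [hemp, List.filter_nil, List.nil_append, List.filter_append,
      List.filter_filter, List.map_cons, List.append_assoc]
    congr 1
    apply List.filter_congr
    intro p _
    by_cases h1 : p.1 = pvFlag a <;> by_cases h2 : p.1 ∈ List.map pvFlag l <;>
      simp [h1, h2]

-- B's recurrence: same shape as A's
theorem pvB_cons (x : String) (xs : List String) :
    deduplicate_args_py_alt (x :: xs) =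
      if pvFlag x ∈ xs.map pvFlag then deduplicate_args_py_alt xs
      else x :: deduplicate_args_py_alt xs := by
  unfold deduplicate_args_py_alt
  simp only [List.foldl_cons, PySem.Dict.values]
  rw [pvB_fold_items xs (pvBStep PySem.Dict.empty x), pvB_step_items]
  have hemp : (PySem.Dict.empty : PySem.Dict String String).items = [] := rfl
  simp only [hemp, List.filter_nil, List.nil_append, List.filter_cons, List.map_append]
  by_cases h : pvFlag x ∈ xs.map pvFlag
  · rw [if_neg (by simp [h]), if_pos h]
    simp
  · rw [if_pos (by simp [h]), if_neg h]
    simp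

-- ===== VERDICT (by name: the statement is the Claim_ definition above) =====
theorem deduplicate_args_py_spec : Claim_equal_deduplicate_args_py := by
  intro args hd
  clear hd
  unfold Spec_deduplicate_args_py
  induction args with
  | nil => rfl
  | cons x xs ih =>
    rw [pvA_cons, pvB_cons, ih]
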